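-- pv_equiv track=rewrite | github.com/eliandoran/codegolf-arecibo | data-generator/main.py | encodeBase91
-- ===== SOURCE A (Python) =====
-- encodingChars = "ABCDEFGHIJKLMNOPQRSTUVWXYZabcdefghijklmnopqrstuvwxyz0123456789!#$%&()*+,./:;<=>?@[]^_`{|}~'"
--
-- def encodeBase91(nr):
--     res = ""
--     d = 0
--     while nr > 0:
--         d, m = divmod(nr, 91)
--         res += encodingChars[m]
--         nr = d
--     res += encodingChars[d]
--     return res[::-1]
-- ===== SOURCE B (Python) =====
-- encodingChars = "ABCDEFGHIJKLMNOPQRSTUVWXYZabcdefghijklmnopqrstuvwxyz0123456789!#$%&()*+,./:;<=>?@[]^_`{|}~'"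
--
-- def encodeBase91(nr):
--     if nr <= 0:
--         return encodingChars[0]
--     d, m = divmod(nr, 91)
--     return encodeBase91(d) + encodingChars[m]
-- ===== Notes on version B (the rewrite author's own statement) =====
-- stated objective: simpler
-- what changed: Replaces the while-loop that accumulates digits least-significant-first and then reverses the string with a direct recursion on the quotient that emits digits most-significant-first, removing the reversal and the post-loop append.
import Mathlib
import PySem

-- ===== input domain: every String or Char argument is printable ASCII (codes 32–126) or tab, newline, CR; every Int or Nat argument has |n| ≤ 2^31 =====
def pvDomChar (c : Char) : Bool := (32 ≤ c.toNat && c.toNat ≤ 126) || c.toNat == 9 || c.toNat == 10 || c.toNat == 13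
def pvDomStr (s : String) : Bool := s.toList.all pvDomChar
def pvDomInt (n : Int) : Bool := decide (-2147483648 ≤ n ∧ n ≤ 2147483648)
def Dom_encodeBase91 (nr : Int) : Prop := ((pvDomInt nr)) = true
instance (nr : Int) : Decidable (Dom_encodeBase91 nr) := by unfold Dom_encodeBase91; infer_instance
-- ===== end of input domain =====

-- B replaces A's digit loop + string reversal by a direct recursion on the quotient (simpler decomposition, same cost).

def encodingChars : List Char :=
  "ABCDEFGHIJKLMNOPQRSTUVWXYZabcdefghijklmnopqrstuvwxyz0123456789!#$%&()*+,./:;<=>?@[]^_`{|}~'".toList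

-- ===== PORT A =====
-- the while loop: state (nr, res, d); indices are always in range, so the getD default is never hit
def encLoopA (nr : Int) (res : List Char) (d : Int) : List Char :=
  if h : nr > 0 then
    encLoopA (PySem.Int.floordiv nr 91)
      (res ++ [(PySem.List.pyGet? encodingChars (PySem.Int.mod nr 91)).getD ' '])
      (PySem.Int.floordiv nr 91)
  else res ++ [(PySem.List.pyGet? encodingChars d).getD ' ']
termination_by nr.toNat
decreasing_by
  rw [PySem.Int.floordiv_eq_ediv_of_pos (by omega)]
  omega

def encodeBase91 (nr : Int) : String :=
  String.ofList ((encLoopA nr [] 0).reverse)   -- res[::-1]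

-- ===== PORT B =====
def encodeBase91_alt (nr : Int) : String :=
  if h : nr ≤ 0 then
    String.ofList [(PySem.List.pyGet? encodingChars 0).getD ' ']
  else
    encodeBase91_alt (PySem.Int.floordiv nr 91)
      ++ String.ofList [(PySem.List.pyGet? encodingChars (PySem.Int.mod nr 91)).getD ' ']
termination_by nr.toNat
decreasing_by
  rw [PySem.Int.floordiv_eq_ediv_of_pos (by omega)]
  omega

-- ===== PRECONDITION & SPEC =====
def Spec_encodeBase91 (nr : Int) (out : String) : Prop := out = encodeBase91_alt nr
instance (nr : Int) (out : String) : Decidable (Spec_encodeBase91 nr out) := by unfold Spec_encodeBase91; infer_instance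

-- ===== CLAIM (what is proved, stated in full; the proofs are below) =====
def Claim_equal_encodeBase91 : Prop := ∀ (nr : Int), Dom_encodeBase91 nr → Spec_encodeBase91 nr (encodeBase91 nr)

-- ===== LEMMAS AND PROOFS =====

-- A's loop only appends to its accumulator; factor the accumulator out
lemma encLoopA_acc (nr : Int) (res : List Char) (d : Int) :
    ∀ res' : List Char, encLoopA nr res' d = res' ++ encLoopA nr [] d := by
  induction nr, res, d using encLoopA.induct with
  | case1 nr res d h ih =>
      intro res'
      conv_lhs => rw [encLoopA]
      conv_rhs => rw [encLoopA]
      simp only [h, dite_true]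
      rw [ih, ih (([] : List Char) ++ _)]
      simp [List.append_assoc]
  | case2 nr res d h =>
      intro res'
      conv_lhs => rw [encLoopA]
      conv_rhs => rw [encLoopA]
      simp [h]

lemma toList_alt (nr : Int) :
    (encodeBase91_alt nr).toList =
      if nr ≤ 0 then [(PySem.List.pyGet? encodingChars 0).getD ' ']
      else (encodeBase91_alt (PySem.Int.floordiv nr 91)).toList
             ++ [(PySem.List.pyGet? encodingChars (PySem.Int.mod nr 91)).getD ' '] := by
  rw [encodeBase91_alt]
  split <;> simp

-- main invariant: on the states the loop actually reaches (nr = d, nr ≥ 0),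
-- A's buffer reversed is exactly B's output
lemma loop_eq_alt (nr : Int) (hnn : 0 ≤ nr) :
    (encLoopA nr [] nr).reverse = (encodeBase91_alt nr).toList := by
  induction nr using encodeBase91_alt.induct with
  | case1 nr h =>
      have h0 : nr = 0 := by omega
      subst h0
      rw [encLoopA, toList_alt]
      norm_num
  | case2 nr h ih =>
      have hpos : nr > 0 := by omega
      have he : PySem.Int.floordiv nr 91 = nr / 91 :=
        PySem.Int.floordiv_eq_ediv_of_pos (by omega)
      have hq : 0 ≤ PySem.Int.floordiv nr 91 := by rw [he]; omega
      conv_lhs => rw [encLoopA]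
      rw [toList_alt]
      simp only [hpos, dite_true, if_neg h]
      rw [encLoopA_acc _ [] _, List.reverse_append, ih hq]
      simp

-- the initial state has d = 0, not d = nr; for nr > 0 the first step ignores d
lemma encLoopA_pos_d (nr : Int) (d d' : Int) (h : nr > 0) :
    encLoopA nr [] d = encLoopA nr [] d' := by
  conv_lhs => rw [encLoopA]
  conv_rhs => rw [encLoopA]
  simp [h]

-- ===== VERDICT (by name: the statement is the Claim_ definition above) =====
theorem encodeBase91_spec : Claim_equal_encodeBase91 := by
  intro nr _
  unfold Spec_encodeBase91 encodeBase91
  by_cases h : nr > 0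
  · rw [encLoopA_pos_d nr 0 nr h, loop_eq_alt nr (by omega)]
    simp
  · rw [encLoopA, encodeBase91_alt]
    simp [h, show nr ≤ 0 by omega]
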